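-- pv_equiv track=rewrite | github.com/quantumxiaol/umamusume-agent-prompt | umamusume_prompt/characters.py | resolve_character
-- ===== SOURCE A (Python) =====
-- from typing import Dict, Tuple
--
-- def resolve_character(name: str, mapping: Dict[str, str]) -> Tuple[str, str, bool]:
--     if name in mapping:
--         return name, mapping[name], True
--     name_lower = name.lower()
--     for cn, en in mapping.items():
--         if en.lower() == name_lower:
--             return cn, en, True
--     return name, name, False
-- ===== SOURCE B (Python) =====
-- def resolve_character(name, mapping):
--     # One full pass: collect the first exact-key hit and the first case-insensitive
--     # English-name hit simultaneously, then decide by priority (exact beats ci).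
--     low = name.lower()
--     exact = None
--     ci = None
--     for cn, en in mapping.items():
--         if exact is None and cn == name:
--             exact = en
--         if ci is None and en.lower() == low:
--             ci = (cn, en)
--     if exact is not None:
--         return name, exact, True
--     if ci is not None:
--         return ci[0], ci[1], True
--     return name, name, False
-- ===== Notes on version B (the rewrite author's own statement) =====
-- stated objective: alternative
-- what changed: Replaces A's dict-membership test followed by an early-exit linear scan with a single full pass that accumulates both the first exact-key hit and the first case-insensitive value hit, then decides by priority after the loop.
import Mathlib
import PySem

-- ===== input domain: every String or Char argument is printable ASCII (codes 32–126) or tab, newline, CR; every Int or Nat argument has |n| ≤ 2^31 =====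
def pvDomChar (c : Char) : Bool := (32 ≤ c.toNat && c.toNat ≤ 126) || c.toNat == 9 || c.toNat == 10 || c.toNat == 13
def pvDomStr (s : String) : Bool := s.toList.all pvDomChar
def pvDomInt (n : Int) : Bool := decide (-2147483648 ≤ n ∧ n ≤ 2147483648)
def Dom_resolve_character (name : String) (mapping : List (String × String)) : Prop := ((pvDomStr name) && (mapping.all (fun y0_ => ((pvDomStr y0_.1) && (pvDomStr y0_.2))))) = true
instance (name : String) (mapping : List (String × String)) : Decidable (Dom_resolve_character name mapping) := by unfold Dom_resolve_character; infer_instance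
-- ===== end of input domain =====

-- B replaces A's membership test + early-exit scan by one full pass that accumulates
-- the first exact-key hit and the first case-insensitive value hit, deciding afterwards
-- by priority (alternative decomposition; same cost).

-- ===== PORT A =====
-- the for-loop over mapping.items() with early return
def resolveLoopA (name nl : String) : List (String × String) → String × String × Bool
  | [] => (name, name, false)
  | (cn, en) :: rest =>
    if PySem.Str.lower en == nl then (cn, en, true) else resolveLoopA name nl rest

def resolve_character (name : String) (mapping : List (String × String)) : String × String × Bool :=
  match (PySem.Dict.mk mapping).get? name with
  | some v => (name, v, true)
  | none => resolveLoopA name (PySem.Str.lower name) mapping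

-- ===== PORT B =====
-- the single accumulating pass of Source B: state = (exact, ci), first hit wins in each slot
def scanB (name low : String) (mapping : List (String × String)) :
    Option String × Option (String × String) :=
  mapping.foldl
    (fun acc p =>
      (if acc.1.isNone && p.1 == name then some p.2 else acc.1,
       if acc.2.isNone && PySem.Str.lower p.2 == low then some p else acc.2))
    (none, none)

def resolve_character_alt (name : String) (mapping : List (String × String)) : String × String × Bool :=
  let st := scanB name (PySem.Str.lower name) mapping
  match st.1 with
  | some en => (name, en, true)
  | none =>
    match st.2 with
    | some (cn, en) => (cn, en, true)
    | none => (name, name, false)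

-- ===== PRECONDITION & SPEC =====
def Spec_resolve_character (name : String) (mapping : List (String × String)) (out : String × String × Bool) : Prop := out = resolve_character_alt name mapping
instance (name : String) (mapping : List (String × String)) (out : String × String × Bool) : Decidable (Spec_resolve_character name mapping out) := by unfold Spec_resolve_character; infer_instance

-- ===== CLAIM (what is proved, stated in full; the proofs are below) =====
def Claim_equal_resolve_character : Prop := ∀ (name : String) (mapping : List (String × String)), Dom_resolve_character name mapping → Spec_resolve_character name mapping (resolve_character name mapping)

-- ===== LEMMAS AND PROOFS =====

-- the scan computes the first match of each kind (fold characterised by find?)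
theorem scanB_aux (name low : String) (l : List (String × String))
    (e : Option String) (c : Option (String × String)) :
    l.foldl
      (fun acc p =>
        (if acc.1.isNone && p.1 == name then some p.2 else acc.1,
         if acc.2.isNone && PySem.Str.lower p.2 == low then some p else acc.2))
      (e, c)
    = (e.or ((l.find? (fun p => p.1 == name)).map (·.2)),
       c.or (l.find? (fun p => PySem.Str.lower p.2 == low))) := by
  induction l generalizing e c with
  | nil => simp
  | cons p rest ih =>
    simp only [List.foldl_cons, List.find?_cons, ih]
    cases e <;> cases c <;>
      by_cases h1 : p.1 == name <;> by_cases h2 : PySem.Str.lower p.2 == low <;>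
        simp [h1, h2, Option.or]

theorem scanB_eq (name low : String) (l : List (String × String)) :
    scanB name low l
    = ((l.find? (fun p => p.1 == name)).map (·.2),
       l.find? (fun p => PySem.Str.lower p.2 == low)) := by
  unfold scanB
  rw [scanB_aux]
  simp [Option.or]

-- A's dict lookup is the first key match in the association list
theorem get?_mk_eq_find (l : List (String × String)) (x : String) :
    (PySem.Dict.mk l).get? x = (l.find? (fun p => p.1 == x)).map (·.2) := by
  induction l with
  | nil => rfl
  | cons p rest ih =>
    obtain ⟨k, v⟩ := p
    rw [PySem.Dict.get?_mk_cons, List.find?_cons]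
    by_cases h : k == x
    · simp [h]
    · simp only [h] at *
      simpa using ih

-- A's early-exit loop is the first case-insensitive value match
theorem resolveLoopA_eq_find (name nl : String) (l : List (String × String)) :
    resolveLoopA name nl l
      = match l.find? (fun p => PySem.Str.lower p.2 == nl) with
        | some (cn, en) => (cn, en, true)
        | none => (name, name, false) := by
  induction l with
  | nil => simp [resolveLoopA]
  | cons p rest ih =>
    obtain ⟨cn, en⟩ := p
    simp only [resolveLoopA, List.find?_cons]
    by_cases h : PySem.Str.lower en == nl
    · simp [h]
    · simp only [h] at *
      simpa using ih

-- ===== VERDICT (by name: the statement is the Claim_ definition above) =====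
theorem resolve_character_spec : Claim_equal_resolve_character := by
  intro name mapping _
  unfold Spec_resolve_character resolve_character resolve_character_alt
  rw [get?_mk_eq_find, resolveLoopA_eq_find, scanB_eq]
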